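-- pv_equiv track=rewrite | github.com/whr819987540/leetcode-master | py_code/数组/二分查找/34-locate_range.py | getRightBorder
-- ===== SOURCE A (Python) =====
-- from typing import List
--
-- def getRightBorder(nums: List[int], target: int):
--     left = 0
--     right = len(nums) - 1  # // 定义target在左闭右闭的区间里，[left, right]
--     rightBorder = -2  # // 记录一下rightBorder没有被赋值的情况
--     while (left <= right):  # // 当left==right，区间[left, right]依然有效
--         middle = (left + right) // 2
--         if (nums[middle] > target):
--             right = middle - 1  # // target 在左区间，所以[left, middle - 1]
--         else:  # // 当nums[middle] == target 的时候，更新left，这样才能得到target的右边界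
--             left = middle + 1
--             rightBorder = left
--
--     return rightBorder
-- ===== SOURCE B (Python) =====
-- def getRightBorder(nums, target):
--     # Recursive search over a half-open interval [lo, hi); no accumulator:
--     # the -2 sentinel is recovered from whether lo ever moved past 0.
--     def go(lo, hi):
--         if lo >= hi:
--             return lo
--         mid = (lo + hi - 1) // 2
--         if nums[mid] > target:
--             return go(lo, mid)
--         return go(mid + 1, hi)
--     lo = go(0, len(nums))
--     return lo if lo else -2
-- ===== Notes on version B (the rewrite author's own statement) =====
-- stated objective: alternative
-- what changed: Replaces the iterative closed-interval loop that threads a rightBorder accumulator by a recursive helper over a half-open interval [lo, hi) with midpoint (lo+hi-1)//2, carrying no accumulator; the -2 sentinel is recovered at the end from whether the left endpoint ever moved past 0.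
import Mathlib
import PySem

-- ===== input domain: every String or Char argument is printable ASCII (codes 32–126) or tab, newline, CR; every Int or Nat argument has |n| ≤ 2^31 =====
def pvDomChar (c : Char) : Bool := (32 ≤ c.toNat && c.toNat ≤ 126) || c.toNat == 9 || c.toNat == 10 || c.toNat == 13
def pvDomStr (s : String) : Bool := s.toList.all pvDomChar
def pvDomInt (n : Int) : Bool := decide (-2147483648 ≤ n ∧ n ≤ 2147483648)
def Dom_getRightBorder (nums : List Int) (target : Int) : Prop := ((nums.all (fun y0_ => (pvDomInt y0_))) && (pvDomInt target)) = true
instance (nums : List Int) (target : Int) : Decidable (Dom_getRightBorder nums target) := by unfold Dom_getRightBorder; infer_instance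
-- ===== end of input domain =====

-- B replaces A's iterative closed-interval loop with a rightBorder accumulator by a recursive
-- half-open-interval search with no accumulator (objective: alternative decomposition, same cost).

-- ===== PORT A =====
-- the while loop of A; the list index is always in range on reachable calls
-- (0 ≤ left ≤ middle ≤ right < nums.length), so .getD 0 is never taken on a none
def getRightBorderLoop (nums : List Int) (target left right rightBorder : Int) : Int :=
  if _h : left ≤ right then
    let middle := PySem.Int.floordiv (left + right) 2
    if (PySem.List.pyGet? nums middle).getD 0 > target then
      getRightBorderLoop nums target left (middle - 1) rightBorder
    else
      getRightBorderLoop nums target (middle + 1) right (middle + 1)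
  else rightBorder
termination_by (right - left + 1).toNat
decreasing_by
  · have := PySem.Int.floordiv_two_mid_bounds _h; omega
  · have := PySem.Int.floordiv_two_mid_bounds _h; omega

def getRightBorder (nums : List Int) (target : Int) : Int :=
  getRightBorderLoop nums target 0 ((nums.length : Int) - 1) (-2)

-- ===== PORT B =====
-- B's recursive helper go(lo, hi) on the half-open interval [lo, hi); indices are Nat.
-- nums[mid] is ported as nums.getD mid 0: exact, since every reachable call has mid < hi ≤ nums.length.
def getRightBorderGo (nums : List Int) (target : Int) (lo hi : Nat) : Nat :=
  if hi ≤ lo then lo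
  else
    let mid := (lo + hi - 1) / 2
    if nums.getD mid 0 > target then
      getRightBorderGo nums target lo mid
    else
      getRightBorderGo nums target (mid + 1) hi
termination_by hi - lo
decreasing_by all_goals omega

def getRightBorder_alt (nums : List Int) (target : Int) : Int :=
  let lo := getRightBorderGo nums target 0 nums.length
  if lo ≠ 0 then (lo : Int) else -2

-- ===== PRECONDITION & SPEC =====
def Spec_getRightBorder (nums : List Int) (target : Int) (out : Int) : Prop := out = getRightBorder_alt nums target
instance (nums : List Int) (target : Int) (out : Int) : Decidable (Spec_getRightBorder nums target out) := by unfold Spec_getRightBorder; infer_instance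

-- ===== CLAIM =====
def Claim_equal_getRightBorder : Prop := ∀ (nums : List Int) (target : Int), Dom_getRightBorder nums target → Spec_getRightBorder nums target (getRightBorder nums target)

-- ===== LEMMAS AND PROOFS =====

-- go never moves the left endpoint backwards
theorem getRightBorderGo_ge (nums : List Int) (target : Int) (lo hi : Nat) :
    lo ≤ getRightBorderGo nums target lo hi := by
  induction lo, hi using getRightBorderGo.induct nums target with
  | case1 lo hi h =>
      rw [getRightBorderGo, if_pos h]
  | case2 lo hi h mid hc ih =>
      have hm : mid = (lo + hi - 1) / 2 := rfl
      rw [getRightBorderGo, if_neg h, ← hm]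
      simp only [List.getD] at hc ⊢
      rw [if_pos hc]
      exact ih
  | case3 lo hi h mid hc ih =>
      have hm : mid = (lo + hi - 1) / 2 := rfl
      rw [getRightBorderGo, if_neg h, ← hm]
      simp only [List.getD] at hc ⊢
      rw [if_neg hc]
      have hge := ih
      omega

-- A's loop on the closed interval [↑lo, ↑hi - 1] returns the same index B's go returns on the
-- half-open [lo, hi) when that index moved past lo, and the accumulator otherwise.
theorem getRightBorderLoop_eq_go (nums : List Int) (target : Int) (lo hi : Nat) (rb : Int)
    (hlen : hi ≤ nums.length) :
    getRightBorderLoop nums target (lo : Int) ((hi : Int) - 1) rb =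
      (if getRightBorderGo nums target lo hi > lo then ((getRightBorderGo nums target lo hi : Nat) : Int) else rb) := by
  induction lo, hi using getRightBorderGo.induct nums target generalizing rb with
  | case1 lo hi h =>
      rw [getRightBorderGo, if_pos h, getRightBorderLoop, dif_neg (by omega)]
      simp
  | case2 lo hi h mid hc ih =>
      have hm : mid = (lo + hi - 1) / 2 := rfl
      have hmid : PySem.Int.floordiv ((lo : Int) + ((hi : Int) - 1)) 2 = (mid : Int) := by
        rw [PySem.Int.floordiv_eq_ediv_of_pos (by omega)]
        rw [hm]; omega
      have hget : (PySem.List.pyGet? nums ((mid : Nat) : Int)).getD 0 = nums.getD mid 0 := by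
        simp [List.getD]
      rw [getRightBorderGo, if_neg h, ← hm]
      rw [getRightBorderLoop, dif_pos (by omega : (lo : Int) ≤ (hi : Int) - 1)]
      simp only [List.getD] at hc hget
      simp only [hmid, hget, List.getD]
      rw [if_pos hc, if_pos hc]
      have hmle : mid ≤ nums.length := by rw [hm]; omega
      have := ih rb hmle
      simpa using this
  | case3 lo hi h mid hc ih =>
      have hm : mid = (lo + hi - 1) / 2 := rfl
      have hmid : PySem.Int.floordiv ((lo : Int) + ((hi : Int) - 1)) 2 = (mid : Int) := by
        rw [PySem.Int.floordiv_eq_ediv_of_pos (by omega)]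
        rw [hm]; omega
      have hget : (PySem.List.pyGet? nums ((mid : Nat) : Int)).getD 0 = nums.getD mid 0 := by
        simp [List.getD]
      rw [getRightBorderGo, if_neg h, ← hm]
      rw [getRightBorderLoop, dif_pos (by omega : (lo : Int) ≤ (hi : Int) - 1)]
      simp only [List.getD] at hc hget
      simp only [hmid, hget, List.getD]
      rw [if_neg hc, if_neg hc]
      have h1 : ((mid : Int)) + 1 = ((mid + 1 : Nat) : Int) := by push_cast; ring
      rw [h1, ih ((mid + 1 : Nat) : Int) hlen]
      have hge := getRightBorderGo_ge nums target (mid + 1) hi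
      have hlomid : lo ≤ mid := by rw [hm]; omega
      split_ifs <;> omega

-- ===== VERDICT =====
theorem getRightBorder_spec : Claim_equal_getRightBorder := by
  intro nums target _
  unfold Spec_getRightBorder getRightBorder getRightBorder_alt
  have := getRightBorderLoop_eq_go nums target 0 nums.length (-2) (le_refl _)
  simp only [Nat.cast_zero] at this
  rw [this]
  simp only [ne_eq]
  split_ifs <;> omega
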